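-- pv_equiv track=rewrite | github.com/HENRIETTA93/pythonProject | assigns/Y2021/cisc121/game_four_five_six.py | maxTotalChips
-- ===== SOURCE A (Python) =====
-- def maxTotalChips(total_chips):
--     '''
--     this function is used to count the number of most chips.
--     :param total_chips:
--     :return:
--     '''
--     max_chips = 0
--     chips_lst = []
--     for p, chips in total_chips.items():
--         chips_lst.append(chips)
--         if max_chips < chips:
--             max_chips = chips
--     return chips_lst.count(max_chips)
-- ===== SOURCE B (Python) =====
-- def maxTotalChips(total_chips):
--     """Single pass: track the running max (floored at 0) and how many times it occurs."""
--     max_chips = 0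
--     count = 0
--     for chips in total_chips.values():
--         if max_chips < chips:
--             max_chips = chips
--             count = 1
--         elif chips == max_chips:
--             count += 1
--     return count
-- ===== Notes on version B (the rewrite author's own statement) =====
-- stated objective: simpler
-- what changed: Instead of storing every value in a list and then scanning it with .count for the max, B keeps two accumulators (running max floored at 0, and its occurrence count, reset on a strictly greater value) in one pass and stores nothing.
import Mathlib
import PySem

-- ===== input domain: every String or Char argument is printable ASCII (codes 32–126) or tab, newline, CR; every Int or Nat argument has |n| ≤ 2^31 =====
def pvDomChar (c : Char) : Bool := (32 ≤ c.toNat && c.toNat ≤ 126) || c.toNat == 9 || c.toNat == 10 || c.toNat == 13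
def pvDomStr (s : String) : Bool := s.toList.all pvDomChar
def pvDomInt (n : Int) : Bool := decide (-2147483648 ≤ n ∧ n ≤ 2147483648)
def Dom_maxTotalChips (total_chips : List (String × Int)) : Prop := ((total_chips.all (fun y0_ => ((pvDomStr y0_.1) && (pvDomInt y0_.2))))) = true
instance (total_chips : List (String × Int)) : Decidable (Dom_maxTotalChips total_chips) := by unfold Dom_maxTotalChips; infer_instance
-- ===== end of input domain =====

-- B replaces A's store-all-values-then-count pass with a single pass keeping two accumulators (running max, its count): simpler, O(1) extra space.


-- ===== PORT A =====
-- loop: append each value to chips_lst, update max_chips on strictly greater; then chips_lst.count(max_chips)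
def maxTotalChips (total_chips : List (String × Int)) : Int :=
  let st := total_chips.foldl
    (fun (s : List Int × Int) pc =>
      let s1 := (s.1 ++ [pc.2], s.2)
      if s1.2 < pc.2 then (s1.1, pc.2) else s1)
    ([], 0)
  (PySem.List.count st.1 st.2 : Int)

-- ===== PORT B =====
-- single pass: (max_chips, count); reset count on strictly greater, increment on equal
def maxTotalChips_alt (total_chips : List (String × Int)) : Int :=
  let st := total_chips.foldl
    (fun (s : Int × Int) pc =>
      if s.1 < pc.2 then (pc.2, 1)
      else if pc.2 == s.1 then (s.1, s.2 + 1)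
      else s)
    (0, 0)
  st.2

-- ===== PRECONDITION & SPEC =====
def Spec_maxTotalChips (total_chips : List (String × Int)) (out : Int) : Prop := out = maxTotalChips_alt total_chips
instance (total_chips : List (String × Int)) (out : Int) : Decidable (Spec_maxTotalChips total_chips out) := by unfold Spec_maxTotalChips; infer_instance

-- ===== CLAIM (what is proved, stated in full; the proofs are below) =====
def Claim_equal_maxTotalChips : Prop := ∀ (total_chips : List (String × Int)), Dom_maxTotalChips total_chips → Spec_maxTotalChips total_chips (maxTotalChips total_chips)

-- ===== LEMMAS AND PROOFS =====

-- running max step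
def pvMaxStep (a v : Int) : Int := if a < v then v else a

theorem pvLeMaxFold : ∀ (vs : List Int) (m : Int), m ≤ vs.foldl pvMaxStep m := by
  intro vs
  induction vs with
  | nil => intro m; simp
  | cons v vs ih =>
    intro m
    simp only [List.foldl_cons]
    refine le_trans ?_ (ih (pvMaxStep m v))
    unfold pvMaxStep; split <;> omega

-- A's loop splits into: values list and running max over them
theorem pvAfold : ∀ (xs : List (String × Int)) (acc : List Int) (m : Int),
    xs.foldl (fun (s : List Int × Int) pc =>
      let s1 := (s.1 ++ [pc.2], s.2)
      if s1.2 < pc.2 then (s1.1, pc.2) else s1) (acc, m)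
    = (acc ++ xs.map (·.2), (xs.map (·.2)).foldl pvMaxStep m) := by
  intro xs
  induction xs with
  | nil => intro acc m; simp
  | cons p xs ih =>
    intro acc m
    simp only [List.foldl_cons, List.map_cons]
    by_cases h : m < p.2
    · simp only [h, if_pos, pvMaxStep]
      rw [ih]; simp [pvMaxStep, h]
    · simp only [h, if_neg, pvMaxStep]
      rw [ih]; simp [pvMaxStep, h]

-- B's loop from an arbitrary state computes the running max and a count relative to it
theorem pvBfold : ∀ (vs : List Int) (m c : Int),
    vs.foldl (fun (s : Int × Int) v =>
        if s.1 < v then (v, 1)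
        else if v == s.1 then (s.1, s.2 + 1)
        else s) (m, c)
    = (vs.foldl pvMaxStep m,
       if vs.foldl pvMaxStep m = m then c + (vs.count (vs.foldl pvMaxStep m) : Int)
       else (vs.count (vs.foldl pvMaxStep m) : Int)) := by
  intro vs
  induction vs with
  | nil => intro m c; simp
  | cons v vs ih =>
    intro m c
    have hM : ∀ m', m' ≤ vs.foldl pvMaxStep m' := fun m' => pvLeMaxFold vs m'
    simp only [List.foldl_cons]
    by_cases h : m < v
    · have hstep : pvMaxStep m v = v := by unfold pvMaxStep; simp [h]
      simp only [h, if_pos, hstep]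
      rw [ih]
      have hne : vs.foldl pvMaxStep v ≠ m := by have := hM v; omega
      have hc : (v :: vs).count (vs.foldl pvMaxStep v) =
          vs.count (vs.foldl pvMaxStep v) + (if v = vs.foldl pvMaxStep v then 1 else 0) := by
        rw [List.count_cons]; simp [beq_iff_eq]
      rw [hc]
      by_cases hv : vs.foldl pvMaxStep v = v
      · simp [hv, hne]; omega
      · have : ¬ (v = vs.foldl pvMaxStep v) := fun e => hv e.symm
        simp [hv, hne, this]
    · have hstep : pvMaxStep m v = m := by unfold pvMaxStep; simp [h]
      simp only [h, if_neg, hstep]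
      by_cases he : v = m
      · simp only [he, beq_self_eq_true, if_pos]
        rw [ih]
        have hc : (m :: vs).count (vs.foldl pvMaxStep m) =
            vs.count (vs.foldl pvMaxStep m) + (if m = vs.foldl pvMaxStep m then 1 else 0) := by
          rw [List.count_cons]; simp [beq_iff_eq]
        rw [hc]
        by_cases hv : vs.foldl pvMaxStep m = m
        · simp [hv]; omega
        · have : ¬ (m = vs.foldl pvMaxStep m) := fun e => hv e.symm
          simp [hv, this]
      · have : (v == m) = false := by simp [he]
        simp only [this, Bool.false_eq_true, if_false]
        rw [ih]
        have hvne : v ≠ vs.foldl pvMaxStep m := by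
          have := hM m; intro e; omega
        have hc : (v :: vs).count (vs.foldl pvMaxStep m) = vs.count (vs.foldl pvMaxStep m) := by
          rw [List.count_cons]; simp [beq_iff_eq, hvne]
        rw [hc]

-- ===== VERDICT (by name: the statement is the Claim_ definition above) =====
theorem maxTotalChips_spec : Claim_equal_maxTotalChips := by
  intro total_chips _
  unfold Spec_maxTotalChips maxTotalChips maxTotalChips_alt
  have hmap : (List.foldl (fun (s : Int × Int) pc =>
      if s.1 < pc.2 then (pc.2, 1) else if pc.2 == s.1 then (s.1, s.2 + 1) else s)
      (0, 0) total_chips)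
    = (total_chips.map (·.2)).foldl (fun (s : Int × Int) v =>
        if s.1 < v then (v, 1) else if v == s.1 then (s.1, s.2 + 1) else s) (0, 0) :=
    by rw [List.foldl_map]
  rw [pvAfold, hmap, pvBfold]
  simp only [List.nil_append, PySem.List.count_eq]
  set vs := total_chips.map (·.2)
  by_cases h0 : vs.foldl pvMaxStep 0 = 0 <;> simp [h0]
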